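-- pv_equiv track=rewrite | github.com/fb1n15/edge-cloud-resource-allocation-using-MARL | src/benchmarks/optimal_pricing_hill_climbing.py | format_allocation
-- ===== SOURCE A (Python) =====
-- def format_allocation(nr_nodes, nr_timestamps, allocation_matrix, start_matrix):
--     """Generate the formatted dict of the allocation of tasks.
--
--     Args:
--         nr_nodes (int): Number of fog nodes.
--         nr_timestamps (int): Number of timestamps.
--         allocation_matrix (matrix): Matrix showing the time allocated for each task.
--         start_matrix (matrix): Matrix showing the start time of each task.
--
--     Returns:
--         [dict] : A formated dict of the allocation scheme.
--     """
--
--     # Prepare variables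
--     nr_tasks = len(allocation_matrix)
--     output = {}
--     for i in range(nr_nodes):
--         output["node_" + str(i)] = {}
--
--     # Define the fill string
--     fill_string = ''.join(['.' for i in range(len(str(nr_tasks)))])
--
--     # Add the occupancy rate for each node at each timestamp
--     for i in range(len(allocation_matrix)):
--
--         for j in range(len(allocation_matrix[0])):
--
--             if allocation_matrix[i][j] != 0:
--                 output["node_" + str(j)][i] = [
--                     fill_string[len(str(i)):] + str(i) if start_matrix[i][
--                                                               j] <= x <
--                                                           start_matrix[i]
--                                                           [j] +
--                                                           allocation_matrix[i][
--                                                               j] else fill_string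
--                     for x in range(nr_timestamps)]
--
--     return output
-- ===== SOURCE B (Python) =====
-- def format_allocation(nr_nodes, nr_timestamps, allocation_matrix, start_matrix):
--     """Node-major rebuild: each node's dict is built directly, and each cell is
--     assembled from the clamped active interval [lo, hi) instead of testing every
--     timestamp with a ternary."""
--     nr_tasks = len(allocation_matrix)
--     fill_string = '.' * len(str(nr_tasks))
--     width = len(allocation_matrix[0]) if allocation_matrix else 0
--     output = {}
--     for j in range(nr_nodes):
--         node = {}
--         if j < width:
--             for i in range(nr_tasks):
--                 alloc = allocation_matrix[i][j]
--                 if alloc != 0: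
--                     start = start_matrix[i][j]
--                     id_string = fill_string[len(str(i)):] + str(i)
--                     lo = max(0, min(start, nr_timestamps))
--                     hi = max(lo, min(start + alloc, nr_timestamps))
--                     node[i] = ([fill_string] * lo
--                                + [id_string] * (hi - lo)
--                                + [fill_string] * (nr_timestamps - hi))
--         output["node_" + str(j)] = node
--     return output
-- ===== Notes on version B (the rewrite author's own statement) =====
-- stated objective: simpler
-- what changed: B swaps the loop nesting to node-major (each node's dict is built directly instead of pre-creating all node dicts and mutating them task-by-task) and assembles each occupancy list from the clamped active interval [lo,hi) by list repetition instead of testing every timestamp with a ternary comprehension.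
-- outside the precondition, e.g. on format_allocation(1, 0, [[2]], []): A returns {'node_0': {0: []}}, B raises IndexError; on format_allocation(0, 2, [[5]], [[0]]): A raises KeyError, B returns {}
import Mathlib
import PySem

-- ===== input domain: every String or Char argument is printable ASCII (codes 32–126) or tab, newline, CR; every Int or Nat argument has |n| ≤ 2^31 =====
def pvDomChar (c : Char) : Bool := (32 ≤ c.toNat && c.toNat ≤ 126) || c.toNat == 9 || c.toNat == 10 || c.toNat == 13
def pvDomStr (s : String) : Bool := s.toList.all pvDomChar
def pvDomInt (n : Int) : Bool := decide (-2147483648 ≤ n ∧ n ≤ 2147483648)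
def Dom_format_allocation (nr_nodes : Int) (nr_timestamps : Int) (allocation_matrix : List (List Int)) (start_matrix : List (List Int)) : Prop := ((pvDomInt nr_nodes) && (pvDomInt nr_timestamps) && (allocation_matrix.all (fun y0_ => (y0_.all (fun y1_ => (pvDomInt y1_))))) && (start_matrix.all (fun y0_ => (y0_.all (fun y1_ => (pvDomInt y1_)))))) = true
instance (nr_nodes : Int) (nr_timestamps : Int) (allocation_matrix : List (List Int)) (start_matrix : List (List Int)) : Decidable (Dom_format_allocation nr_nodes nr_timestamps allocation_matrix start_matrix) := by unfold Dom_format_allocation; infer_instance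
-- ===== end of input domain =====

-- B rebuilds the output node-by-node (node-major loop) and assembles each cell from the
-- clamped active interval instead of testing every timestamp; objective: simpler/alternative.

-- ===== PORT A =====
def format_allocation (nr_nodes : Int) (nr_timestamps : Int) (allocation_matrix : List (List Int)) (start_matrix : List (List Int)) : List (String × List (Int × List String)) :=
  let nr_tasks : Int := PySem.List.len allocation_matrix
  let output0 : PySem.Dict String (PySem.Dict Int (List String)) :=
    (PySem.List.pyRange 0 nr_nodes 1).foldl
      (fun d i => d.insert ("node_" ++ PySem.Int.toStr i) PySem.Dict.empty) PySem.Dict.empty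
  let fill_string : String :=
    PySem.Str.join "" ((PySem.List.pyRange 0 (PySem.Str.len (PySem.Int.toStr nr_tasks)) 1).map (fun _ => "."))
  let output :=
    (PySem.List.pyRange 0 (PySem.List.len allocation_matrix) 1).foldl (fun out i =>
      (PySem.List.pyRange 0 (PySem.List.len (PySem.List.pyGetD allocation_matrix 0 [])) 1).foldl (fun out j =>
        if PySem.List.pyGetD (PySem.List.pyGetD allocation_matrix i []) j 0 ≠ 0 then
          -- output["node_" + str(j)][i] = [comprehension]  (KeyError when the key is absent
          -- is excluded by Pre_; modify with an empty default is exact on Pre_)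
          out.modify ("node_" ++ PySem.Int.toStr j) PySem.Dict.empty (fun node =>
            node.insert i ((PySem.List.pyRange 0 nr_timestamps 1).map (fun x =>
              if PySem.List.pyGetD (PySem.List.pyGetD start_matrix i []) j 0 ≤ x ∧
                 x < PySem.List.pyGetD (PySem.List.pyGetD start_matrix i []) j 0
                     + PySem.List.pyGetD (PySem.List.pyGetD allocation_matrix i []) j 0
              then PySem.Str.slice fill_string (some (PySem.Str.len (PySem.Int.toStr i))) none ++ PySem.Int.toStr i
              else fill_string)))
        else out) out) output0
  output.items.map (fun p => (p.1, p.2.items))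

-- ===== PORT B =====
def format_allocation_alt (nr_nodes : Int) (nr_timestamps : Int) (allocation_matrix : List (List Int)) (start_matrix : List (List Int)) : List (String × List (Int × List String)) :=
  let nr_tasks : Int := PySem.List.len allocation_matrix
  -- '.' * len(str(nr_tasks)) : string repetition is pyRepeat on the character list (exact)
  let fill_string : String :=
    String.ofList (PySem.List.pyRepeat ['.'] (PySem.Str.len (PySem.Int.toStr nr_tasks)))
  let width : Int :=
    if allocation_matrix = [] then 0 else PySem.List.len (PySem.List.pyGetD allocation_matrix 0 [])
  let output : PySem.Dict String (PySem.Dict Int (List String)) :=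
    (PySem.List.pyRange 0 nr_nodes 1).foldl (fun out j =>
      let node : PySem.Dict Int (List String) :=
        if j < width then
          (PySem.List.pyRange 0 nr_tasks 1).foldl (fun nd i =>
            let alloc := PySem.List.pyGetD (PySem.List.pyGetD allocation_matrix i []) j 0
            if alloc ≠ 0 then
              let start := PySem.List.pyGetD (PySem.List.pyGetD start_matrix i []) j 0
              let id_string := PySem.Str.slice fill_string (some (PySem.Str.len (PySem.Int.toStr i))) none ++ PySem.Int.toStr i
              let lo := max 0 (min start nr_timestamps)
              let hi := max lo (min (start + alloc) nr_timestamps)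
              nd.insert i (PySem.List.pyRepeat [fill_string] lo
                ++ PySem.List.pyRepeat [id_string] (hi - lo)
                ++ PySem.List.pyRepeat [fill_string] (nr_timestamps - hi))
            else nd) PySem.Dict.empty
        else PySem.Dict.empty
      out.insert ("node_" ++ PySem.Int.toStr j) node) PySem.Dict.empty
  output.items.map (fun p => (p.1, p.2.items))

-- ===== PRECONDITION & SPEC =====
-- Pre_ restricts to the natural domain: every allocation row is at least as wide as the first
-- row, and wherever a task has a nonzero allocation the column is a real node (j < nr_nodes)
-- and the start matrix has that entry; outside this A raises (IndexError/KeyError), except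
-- that with nr_timestamps <= 0 A's empty comprehension never reads a missing start entry and
-- returns, while B (which always reads it) raises.
def Pre_format_allocation (nr_nodes : Int) (nr_timestamps : Int) (allocation_matrix : List (List Int)) (start_matrix : List (List Int)) : Prop :=
  (∀ row ∈ allocation_matrix, (allocation_matrix.headD []).length ≤ row.length) ∧
  (∀ i < allocation_matrix.length, ∀ j < (allocation_matrix.headD []).length,
     (allocation_matrix.getD i []).getD j 0 ≠ 0 →
       ((j : Int) < nr_nodes ∧ i < start_matrix.length ∧ j < (start_matrix.getD i []).length))
instance (nr_nodes : Int) (nr_timestamps : Int) (allocation_matrix : List (List Int)) (start_matrix : List (List Int)) : Decidable (Pre_format_allocation nr_nodes nr_timestamps allocation_matrix start_matrix) := by unfold Pre_format_allocation; infer_instance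

def pvWitness_format_allocation : Int × Int × List (List Int) × List (List Int) :=
  (2, 3, [[2, 0], [1, 1]], [[0, 0], [1, 2]])

def Spec_format_allocation (nr_nodes : Int) (nr_timestamps : Int) (allocation_matrix : List (List Int)) (start_matrix : List (List Int)) (out : List (String × List (Int × List String))) : Prop := out = format_allocation_alt nr_nodes nr_timestamps allocation_matrix start_matrix
instance (nr_nodes : Int) (nr_timestamps : Int) (allocation_matrix : List (List Int)) (start_matrix : List (List Int)) (out : List (String × List (Int × List String))) : Decidable (Spec_format_allocation nr_nodes nr_timestamps allocation_matrix start_matrix out) := by unfold Spec_format_allocation; infer_instance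

-- ===== CLAIM (what is proved, stated in full; the proofs are below) =====
def Claim_equal_format_allocation : Prop := ∀ (nr_nodes : Int) (nr_timestamps : Int) (allocation_matrix : List (List Int)) (start_matrix : List (List Int)), Dom_format_allocation nr_nodes nr_timestamps allocation_matrix start_matrix → Pre_format_allocation nr_nodes nr_timestamps allocation_matrix start_matrix → Spec_format_allocation nr_nodes nr_timestamps allocation_matrix start_matrix (format_allocation nr_nodes nr_timestamps allocation_matrix start_matrix)

-- ===== LEMMAS AND PROOFS =====

theorem pv_digitChar_inj : ∀ a < 10, ∀ b < 10, Nat.digitChar a = Nat.digitChar b → a = b := by decide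

theorem pv_toDigits_big {n : Nat} (h : ¬ n < 10) :
    Nat.toDigits 10 n = Nat.toDigits 10 (n / 10) ++ [(n % 10).digitChar] := by
  conv_lhs => rw [Nat.toDigits_eq_if (by norm_num)]
  rw [if_neg h]

-- decimal digit strings are injective
theorem pv_toDigitsTen_inj : ∀ (a b : Nat), Nat.toDigits 10 a = Nat.toDigits 10 b → a = b := by
  intro a
  induction a using Nat.strong_induction_on with
  | _ a ih =>
    intro b h
    by_cases ha : a < 10 <;> by_cases hb : b < 10
    · rw [Nat.toDigits_of_lt_base ha, Nat.toDigits_of_lt_base hb] at h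
      simp at h
      exact pv_digitChar_inj a ha b hb h
    · rw [Nat.toDigits_of_lt_base ha, pv_toDigits_big hb] at h
      have := congrArg List.length h
      simp only [List.length_append, List.length_cons, List.length_nil] at this
      have := @Nat.length_toDigits_pos 10 (b / 10)
      omega
    · rw [pv_toDigits_big ha, Nat.toDigits_of_lt_base hb] at h
      have := congrArg List.length h
      simp only [List.length_append, List.length_cons, List.length_nil] at this
      have := @Nat.length_toDigits_pos 10 (a / 10)
      omega
    · rw [pv_toDigits_big ha, pv_toDigits_big hb] at h
      rw [← List.concat_eq_append, ← List.concat_eq_append] at h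
      have h2 := List.concat_inj.mp h
      have e1 := ih (a / 10) (by omega) (b / 10) h2.1
      have e2 := pv_digitChar_inj (a % 10) (by omega) (b % 10) (by omega) h2.2
      omega

-- the node keys are injective on nonnegative indices
theorem pv_key_inj (a b : Int) (ha : 0 ≤ a) (hb : 0 ≤ b)
    (h : "node_" ++ PySem.Int.toStr a = "node_" ++ PySem.Int.toStr b) : a = b := by
  have h1 : (PySem.Int.toStr a).toList = (PySem.Int.toStr b).toList := by
    have := congrArg String.toList h
    simpa [String.toList_append] using this
  rw [PySem.Int.toList_toStr, PySem.Int.toList_toStr] at h1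
  unfold PySem.Int.toChars at h1
  rw [if_neg (by omega), if_neg (by omega)] at h1
  have := pv_toDigitsTen_inj _ _ h1
  omega

-- the per-timestamp comprehension equals the three-block interval form
theorem pv_cell_eq {α : Type} (s a nts : Int) (u v : α) :
    ((PySem.List.pyRange 0 nts 1).map (fun x => if s ≤ x ∧ x < s + a then u else v))
      = PySem.List.pyRepeat [v] (max 0 (min s nts))
        ++ PySem.List.pyRepeat [u] (max (max 0 (min s nts)) (min (s + a) nts) - max 0 (min s nts))
        ++ PySem.List.pyRepeat [v] (nts - max (max 0 (min s nts)) (min (s + a) nts)) := by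
  simp only [PySem.List.pyRepeat_singleton]
  set lo : Int := max 0 (min s nts) with hlo
  set hi : Int := max lo (min (s + a) nts) with hhi
  have hb1 : 0 ≤ lo := by omega
  have hb2 : lo ≤ hi := by omega
  apply List.ext_getElem
  · simp [PySem.List.length_pyRange_one]
    omega
  · intro k hk1 hk2
    simp only [PySem.List.length_pyRange_one, List.length_map] at hk1
    rw [List.getElem_map, PySem.List.getElem_pyRange_one]
    rw [List.getElem_append]
    by_cases c0 : k < (List.replicate lo.toNat v ++ List.replicate (hi - lo).toNat u).length
    · rw [dif_pos c0, List.getElem_append]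
      by_cases c1 : k < (List.replicate lo.toNat v).length
      · rw [dif_pos c1]
        simp only [List.length_replicate] at c1
        rw [List.getElem_replicate, if_neg (by omega)]
      · rw [dif_neg c1]
        simp only [List.length_replicate, List.length_append] at c0 c1
        rw [List.getElem_replicate, if_pos (by omega)]
    · rw [dif_neg c0]
      simp only [List.length_replicate, List.length_append] at c0
      rw [List.getElem_replicate, if_neg (by omega)]

-- getD on a key-indexed map picks out that index's value
theorem pv_getD_mk_map (key : Int → String) (js : List Int) (g : Int → PySem.Dict Int (List String))
    (j0 : Int) (hmem : j0 ∈ js) (hinj : ∀ x ∈ js, key x = key j0 → x = j0)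
    (dflt : PySem.Dict Int (List String)) :
    (PySem.Dict.mk (js.map (fun j => (key j, g j)))).getD (key j0) dflt = g j0 := by
  induction js with
  | nil => simp at hmem
  | cons c cs ih =>
    rw [List.map_cons, PySem.Dict.getD_eq_get?_getD, PySem.Dict.get?_mk_cons]
    by_cases hc : key c = key j0
    · have : c = j0 := hinj c (List.mem_cons_self) hc
      subst this
      simp
    · rw [if_neg (by simpa using hc)]
      rw [← PySem.Dict.getD_eq_get?_getD]
      have hm : j0 ∈ cs := by
        rcases List.mem_cons.mp hmem with h | h
        · exact absurd (congrArg key h.symm) hc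
        · exact h
      exact ih hm (fun x hx => hinj x (List.mem_cons_of_mem _ hx))

theorem pv_contains_mk_map (key : Int → String) (js : List Int) (g : Int → PySem.Dict Int (List String))
    (j0 : Int) (hmem : j0 ∈ js) :
    (PySem.Dict.mk (js.map (fun j => (key j, g j)))).contains (key j0) = true := by
  rw [PySem.Dict.contains_iff_mem_keys]
  simp only [PySem.Dict.keys_mk, List.map_map]
  exact List.mem_map.mpr ⟨j0, hmem, rfl⟩

-- modify on a key-indexed map rewrites exactly that index's value
theorem pv_modify_mk_map (key : Int → String) (js : List Int) (g : Int → PySem.Dict Int (List String))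
    (j0 : Int) (hmem : j0 ∈ js) (hinj : ∀ x ∈ js, key x = key j0 → x = j0)
    (dflt : PySem.Dict Int (List String)) (f : PySem.Dict Int (List String) → PySem.Dict Int (List String)) :
    (PySem.Dict.mk (js.map (fun j => (key j, g j)))).modify (key j0) dflt f
      = PySem.Dict.mk (js.map (fun j => (key j, if j = j0 then f (g j) else g j))) := by
  unfold PySem.Dict.modify PySem.Dict.insert
  rw [pv_getD_mk_map key js g j0 hmem hinj]
  rw [if_pos (pv_contains_mk_map key js g j0 hmem)]
  apply PySem.Dict.ext
  simp only [List.map_map]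
  apply List.map_congr_left
  intro x hx
  by_cases h : x = j0
  · subst h; simp
  · have : ¬ (key x = key j0) := fun hk => h (hinj x hx hk)
    simp [Function.comp, this, h]

-- one guarded-modify sweep over the columns, on a key-indexed map
theorem pv_foldl_guard_modify (key : Int → String) (js cols : List Int)
    (hinj : ∀ x ∈ js, ∀ y ∈ js, key x = key y → x = y)
    (P : Int → Prop) [DecidablePred P] (hP : ∀ j ∈ cols, P j → j ∈ js)
    (hnc : cols.Nodup)
    (f : Int → PySem.Dict Int (List String) → PySem.Dict Int (List String))
    (dflt : PySem.Dict Int (List String)) (g : Int → PySem.Dict Int (List String)) :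
    cols.foldl (fun out j => if P j then out.modify (key j) dflt (f j) else out)
        (PySem.Dict.mk (js.map (fun j => (key j, g j))))
      = PySem.Dict.mk (js.map (fun j => (key j, if j ∈ cols ∧ P j then f j (g j) else g j))) := by
  induction cols generalizing g with
  | nil => simp
  | cons c cs ih =>
    rw [List.foldl_cons]
    have hnc' : cs.Nodup := hnc.of_cons
    have hcn : c ∉ cs := (List.nodup_cons.mp hnc).1
    have hP' : ∀ j ∈ cs, P j → j ∈ js := fun j hj => hP j (List.mem_cons_of_mem _ hj)
    by_cases hpc : P c
    · rw [if_pos hpc]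
      rw [pv_modify_mk_map key js g c (hP c List.mem_cons_self hpc)
            (fun x hx hk => hinj x hx c (hP c List.mem_cons_self hpc) hk) dflt (f c)]
      rw [ih hP' hnc' (fun j => if j = c then f c (g j) else g j)]
      apply congrArg
      apply List.map_congr_left
      intro x hx
      by_cases hxc : x = c
      · subst hxc
        simp [hcn, hpc]
      · simp [hxc, List.mem_cons]
    · rw [if_neg hpc]
      rw [ih hP' hnc' g]
      apply congrArg
      apply List.map_congr_left
      intro x hx
      by_cases hxc : x = c
      · subst hxc
        simp [hpc]
      · simp [hxc, List.mem_cons]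

-- A's whole double loop, on a key-indexed map
theorem pv_foldl_tasks (key : Int → String) (js cols : List Int)
    (hinj : ∀ x ∈ js, ∀ y ∈ js, key x = key y → x = y)
    (hnc : cols.Nodup)
    (L : List Int) (Q : Int → Int → Prop) [∀ i j, Decidable (Q i j)]
    (hQ : ∀ i ∈ L, ∀ j ∈ cols, Q i j → j ∈ js)
    (F : Int → Int → PySem.Dict Int (List String) → PySem.Dict Int (List String))
    (dflt : PySem.Dict Int (List String)) (g : Int → PySem.Dict Int (List String)) :
    L.foldl (fun out i => cols.foldl
        (fun out j => if Q i j then out.modify (key j) dflt (F i j) else out) out)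
        (PySem.Dict.mk (js.map (fun j => (key j, g j))))
      = PySem.Dict.mk (js.map (fun j =>
          (key j, L.foldl (fun nd i => if j ∈ cols ∧ Q i j then F i j nd else nd) (g j)))) := by
  induction L generalizing g with
  | nil => simp
  | cons i L' ih =>
    rw [List.foldl_cons]
    rw [pv_foldl_guard_modify key js cols hinj (Q i) (hQ i List.mem_cons_self) hnc (F i) dflt g]
    rw [ih (fun i' hi' => hQ i' (List.mem_cons_of_mem _ hi')) _]
    apply congrArg
    apply List.map_congr_left
    intro x hx
    simp

-- A's fill string (join of '.' copies) equals B's fill string (character repetition)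
theorem pv_fill_eq (L : Int) :
    PySem.Str.join "" ((PySem.List.pyRange 0 L 1).map (fun _ => "."))
      = String.ofList (PySem.List.pyRepeat ['.'] L) := by
  simp only [PySem.Str.join]
  congr 1
  simp only [List.map_map, PySem.List.pyRepeat]
  have h1 : ((PySem.List.pyRange 0 L 1).map (String.toList ∘ fun _ => "."))
      = List.replicate (L).toNat ['.'] := by
    rw [List.eq_replicate_iff]
    constructor
    · simp [PySem.List.length_pyRange_one]
    · intro b hb
      rcases List.mem_map.mp hb with ⟨x, hx, rfl⟩
      simp
  have h2 : String.toList "" = [] := rfl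
  rw [h2, h1]
  have h3 : List.replicate L.toNat ['.'] = (List.replicate L.toNat '.').map (fun c => [c]) := by
    simp
  rw [h3, PySem.Chars.join_nil_singletons]
  generalize L.toNat = n
  induction n with
  | zero => rfl
  | succ n ih =>
    rw [List.replicate_succ, List.map_cons, List.flatten_cons, ← ih]
    rfl

-- a fold whose guard never fires is the identity
theorem pv_foldl_if_none {β : Type} (L : List Int) (P : Int → Prop) [DecidablePred P]
    (F : Int → β → β) (d : β) (h : ∀ i ∈ L, ¬ P i) :
    L.foldl (fun nd i => if P i then F i nd else nd) d = d := by
  induction L generalizing d with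
  | nil => rfl
  | cons c cs ih =>
    rw [List.foldl_cons, if_neg (h c List.mem_cons_self)]
    exact ih _ (fun i hi => h i (List.mem_cons_of_mem _ hi))

-- row 0 of the allocation matrix
theorem pv_head_eq (am : List (List Int)) : PySem.List.pyGetD am 0 [] = am.headD [] := by
  cases am with
  | nil => rfl
  | cons a l => simp [PySem.List.pyGetD]

-- ===== VERDICT (by name: the statement is the Claim_ definition above) =====
theorem format_allocation_spec : Claim_equal_format_allocation := by
  intro nn nts am sm _dom hpre
  unfold Spec_format_allocation
  obtain ⟨hpre1, hpre2⟩ := hpre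
  simp only [format_allocation, format_allocation_alt]
  rw [pv_fill_eq]
  have hwidth : (if am = [] then (0:Int) else PySem.List.len (PySem.List.pyGetD am 0 []))
      = PySem.List.len (PySem.List.pyGetD am 0 []) := by
    cases am with
    | nil => simp [PySem.List.pyGetD]
    | cons a l => simp
  rw [hwidth]
  set fill : String := String.ofList (PySem.List.pyRepeat ['.'] (PySem.Str.len (PySem.Int.toStr (PySem.List.len am)))) with hfill
  set js : List Int := PySem.List.pyRange 0 nn 1 with hjs
  set w : Int := PySem.List.len (PySem.List.pyGetD am 0 []) with hw
  set cols : List Int := PySem.List.pyRange 0 w 1 with hcols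
  set tasks : List Int := PySem.List.pyRange 0 (PySem.List.len am) 1 with htasks
  -- key injectivity on js
  have hinj : ∀ x ∈ js, ∀ y ∈ js, ("node_" ++ PySem.Int.toStr x) = ("node_" ++ PySem.Int.toStr y) → x = y := by
    intro x hx y hy h
    have hx' := PySem.List.mem_pyRange_one.mp hx
    have hy' := PySem.List.mem_pyRange_one.mp hy
    exact pv_key_inj x y hx'.1 hy'.1 h
  have hmapnodup : (js.map (fun j => "node_" ++ PySem.Int.toStr j)).Nodup :=
    List.Nodup.map_on hinj (PySem.List.nodup_pyRange_one 0 nn)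
  -- the initial dict of A
  have hinit : List.foldl (fun d i => d.insert ("node_" ++ PySem.Int.toStr i) (PySem.Dict.empty : PySem.Dict Int (List String)))
      PySem.Dict.empty js
      = PySem.Dict.mk (js.map (fun j => ("node_" ++ PySem.Int.toStr j, (PySem.Dict.empty : PySem.Dict Int (List String))))) := by
    apply PySem.Dict.ext
    rw [PySem.Dict.items_foldl_insert_fresh js (fun i => "node_" ++ PySem.Int.toStr i)
      (fun _ => PySem.Dict.empty) PySem.Dict.empty (fun a _ => by simp) hmapnodup]
    simp [PySem.Dict.empty]
  rw [hinit]
  -- the columns of the loops are nodup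
  have hnc : cols.Nodup := PySem.List.nodup_pyRange_one 0 w
  -- Pre_ gives: a nonzero allocation column is a real node
  have hQ : ∀ i ∈ tasks, ∀ j ∈ cols,
      (PySem.List.pyGetD (PySem.List.pyGetD am i []) j 0 ≠ 0) → j ∈ js := by
    intro i hi j hj hq
    have hi' := PySem.List.mem_pyRange_one.mp hi
    have hj' := PySem.List.mem_pyRange_one.mp hj
    rw [PySem.List.len_eq] at hi'
    have hilen : i.toNat < am.length := by omega
    have hrow : PySem.List.pyGetD am i [] = am[i.toNat] :=
      PySem.List.pyGetD_eq_getElem am [] hi'.1 hi'.2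
    have hrowmem : am[i.toNat] ∈ am := List.getElem_mem hilen
    have hwlen : w = ((am.headD []).length : Int) := by
      rw [hw, pv_head_eq, PySem.List.len_eq]
    have hjlen : j.toNat < (am.headD []).length := by omega
    have hjrow : (j : Int) < (am[i.toNat].length : Int) := by
      have := hpre1 am[i.toNat] hrowmem
      omega
    have hcell : PySem.List.pyGetD (PySem.List.pyGetD am i []) j 0 = am[i.toNat].getD j.toNat 0 := by
      rw [hrow, PySem.List.pyGetD_eq_getElem am[i.toNat] 0 hj'.1 hjrow]
      rw [List.getD_eq_getElem am[i.toNat] 0 (by omega)]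
    have hgetD : am.getD i.toNat [] = am[i.toNat] := List.getD_eq_getElem am [] hilen
    have := hpre2 i.toNat hilen j.toNat hjlen (by rw [hgetD]; rw [hcell] at hq; exact hq)
    apply PySem.List.mem_pyRange_one.mpr
    constructor
    · exact hj'.1
    · have h0 : ((j.toNat : Int)) = j := Int.toNat_of_nonneg hj'.1
      omega
  -- A's double loop on the key-indexed map
  rw [pv_foldl_tasks (fun j => "node_" ++ PySem.Int.toStr j) js cols hinj hnc tasks
    (fun i j => PySem.List.pyGetD (PySem.List.pyGetD am i []) j 0 ≠ 0) hQ
    (fun i j => fun node => node.insert i ((PySem.List.pyRange 0 nts 1).map (fun x =>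
      if PySem.List.pyGetD (PySem.List.pyGetD sm i []) j 0 ≤ x ∧
         x < PySem.List.pyGetD (PySem.List.pyGetD sm i []) j 0
             + PySem.List.pyGetD (PySem.List.pyGetD am i []) j 0
      then PySem.Str.slice fill (some (PySem.Str.len (PySem.Int.toStr i))) none ++ PySem.Int.toStr i
      else fill)))
    PySem.Dict.empty (fun _ => PySem.Dict.empty)]
  -- B's loop on the key-indexed map
  have hB : List.foldl (fun out j => out.insert ("node_" ++ PySem.Int.toStr j)
        (if j < w then
          tasks.foldl (fun nd i =>
            if PySem.List.pyGetD (PySem.List.pyGetD am i []) j 0 ≠ 0 then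
              nd.insert i (PySem.List.pyRepeat [fill] (max 0 (min (PySem.List.pyGetD (PySem.List.pyGetD sm i []) j 0) nts))
                ++ PySem.List.pyRepeat [PySem.Str.slice fill (some (PySem.Str.len (PySem.Int.toStr i))) none ++ PySem.Int.toStr i]
                    (max (max 0 (min (PySem.List.pyGetD (PySem.List.pyGetD sm i []) j 0) nts)) (min (PySem.List.pyGetD (PySem.List.pyGetD sm i []) j 0 + PySem.List.pyGetD (PySem.List.pyGetD am i []) j 0) nts)
                      - max 0 (min (PySem.List.pyGetD (PySem.List.pyGetD sm i []) j 0) nts))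
                ++ PySem.List.pyRepeat [fill]
                    (nts - max (max 0 (min (PySem.List.pyGetD (PySem.List.pyGetD sm i []) j 0) nts)) (min (PySem.List.pyGetD (PySem.List.pyGetD sm i []) j 0 + PySem.List.pyGetD (PySem.List.pyGetD am i []) j 0) nts)))
            else nd) PySem.Dict.empty
        else PySem.Dict.empty)) PySem.Dict.empty js
      = PySem.Dict.mk (js.map (fun j => ("node_" ++ PySem.Int.toStr j,
          (if j < w then
            tasks.foldl (fun nd i =>
              if PySem.List.pyGetD (PySem.List.pyGetD am i []) j 0 ≠ 0 then
                nd.insert i (PySem.List.pyRepeat [fill] (max 0 (min (PySem.List.pyGetD (PySem.List.pyGetD sm i []) j 0) nts))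
                  ++ PySem.List.pyRepeat [PySem.Str.slice fill (some (PySem.Str.len (PySem.Int.toStr i))) none ++ PySem.Int.toStr i]
                      (max (max 0 (min (PySem.List.pyGetD (PySem.List.pyGetD sm i []) j 0) nts)) (min (PySem.List.pyGetD (PySem.List.pyGetD sm i []) j 0 + PySem.List.pyGetD (PySem.List.pyGetD am i []) j 0) nts)
                        - max 0 (min (PySem.List.pyGetD (PySem.List.pyGetD sm i []) j 0) nts))
                  ++ PySem.List.pyRepeat [fill]
                      (nts - max (max 0 (min (PySem.List.pyGetD (PySem.List.pyGetD sm i []) j 0) nts)) (min (PySem.List.pyGetD (PySem.List.pyGetD sm i []) j 0 + PySem.List.pyGetD (PySem.List.pyGetD am i []) j 0) nts)))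
              else nd) PySem.Dict.empty
          else PySem.Dict.empty)))) := by
    apply PySem.Dict.ext
    rw [PySem.Dict.items_foldl_insert_fresh js (fun j => "node_" ++ PySem.Int.toStr j)
      _ PySem.Dict.empty (fun a _ => by simp) hmapnodup]
    simp [PySem.Dict.empty]
  rw [hB]
  -- compare the per-node values
  congr 1
  apply List.map_congr_left
  intro j hj
  have hj' := PySem.List.mem_pyRange_one.mp hj
  congr 1
  by_cases hjw : j < w
  · rw [if_pos hjw]
    apply PySem.List.foldl_congr_mem
    intro acc i hi
    have hjc : j ∈ cols := PySem.List.mem_pyRange_one.mpr ⟨hj'.1, hjw⟩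
    by_cases hq : PySem.List.pyGetD (PySem.List.pyGetD am i []) j 0 ≠ 0
    · rw [if_pos ⟨hjc, hq⟩, if_pos hq, pv_cell_eq]
    · rw [if_neg (fun hcon => hq hcon.2), if_neg hq]
  · rw [if_neg hjw]
    apply pv_foldl_if_none
    intro i hi hcon
    exact hjw (PySem.List.mem_pyRange_one.mp hcon.1).2
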